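-- pv_equiv track=rewrite | github.com/arundhati08mishra/Python-practice | k-k.py | solve
-- ===== SOURCE A (Python) =====
-- def solve(nums):
-- 	maxx = -1
-- 	set1 = set(nums)
-- 	dict1 = {}
--
-- 	for i in set1:
-- 		dict1[i] = -i
-- 		if dict1[i] in set1 and i>maxx:
-- 			maxx = i
--
-- 	return maxx
-- ===== SOURCE B (Python) =====
-- def solve(nums):
--     s = set(nums)
--     for x in sorted(s, reverse=True):
--         if -x in s:
--             return x
--     return -1
-- ===== Notes on version B (the rewrite author's own statement) =====
-- stated objective: alternative
-- what changed: Replaces the hash-set loop with a running max and a shadow dict by a sort of the distinct values in descending order followed by an early-return scan for the first value whose negation is present.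
import Mathlib
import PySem

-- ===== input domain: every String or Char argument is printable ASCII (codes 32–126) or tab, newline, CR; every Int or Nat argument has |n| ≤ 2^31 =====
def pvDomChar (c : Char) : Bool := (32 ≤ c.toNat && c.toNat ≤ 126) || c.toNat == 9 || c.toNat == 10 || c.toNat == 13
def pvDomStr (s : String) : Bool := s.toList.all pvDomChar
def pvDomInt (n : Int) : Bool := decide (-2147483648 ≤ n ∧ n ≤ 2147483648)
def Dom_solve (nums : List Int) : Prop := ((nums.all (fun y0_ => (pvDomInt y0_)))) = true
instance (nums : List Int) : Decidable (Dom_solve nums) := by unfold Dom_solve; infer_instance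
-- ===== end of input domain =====

-- B replaces A's hash-set loop (running max + shadow dict) by a descending sort of the
-- distinct values and an early-return scan for the first value whose negation is present.

-- ===== PORT A =====
-- for-loop over set1 with accumulators (maxx, dict1); the result (a max) is iteration-order independent.
def solve (nums : List Int) : Int :=
  let set1 : PySem.Set Int := PySem.Set.ofList nums
  (set1.foldl (fun (st : Int × PySem.Dict Int Int) i =>
      let dict1 := st.2.insert i (-i)
      -- dict1[i] cannot raise: the key i was just assigned, so getD's default is never used
      if PySem.Set.contains set1 (dict1.getD i 0) && decide (i > st.1) then (i, dict1)
      else (st.1, dict1))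
    ((-1 : Int), PySem.Dict.empty)).1

-- ===== PORT B =====
-- 'for x in sorted(s, reverse=True): if -x in s: return x' / 'return -1'
def solveFind (s : PySem.Set Int) : List Int → Int
  | [] => -1
  | x :: xs => if PySem.Set.contains s (-x) then x else solveFind s xs

def solve_alt (nums : List Int) : Int :=
  let s : PySem.Set Int := PySem.Set.ofList nums
  solveFind s (PySem.List.sorted s (fun x => x) true)

-- ===== PRECONDITION & SPEC =====
def Spec_solve (nums : List Int) (out : Int) : Prop := out = solve_alt nums
instance (nums : List Int) (out : Int) : Decidable (Spec_solve nums out) := by unfold Spec_solve; infer_instance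

-- ===== CLAIM =====
def Claim_equal_solve : Prop := ∀ (nums : List Int), Dom_solve nums → Spec_solve nums (solve nums)

-- ===== LEMMAS AND PROOFS =====

-- A with the dict accumulator stripped: the condition only ever reads the freshly inserted key.
theorem solve_fst_eq (S : PySem.Set Int) :
    ∀ (L : List Int) (m : Int) (d : PySem.Dict Int Int),
      (L.foldl (fun (st : Int × PySem.Dict Int Int) i =>
        if -i ∈ S ∧ st.1 < i then (i, st.2.insert i (-i)) else (st.1, st.2.insert i (-i))) (m, d)).1
      = L.foldl (fun m i => if -i ∈ S ∧ m < i then i else m) m := by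
  intro L
  induction L with
  | nil => intro m d; rfl
  | cons x xs ih =>
      intro m d
      simp only [List.foldl_cons]
      by_cases h : -x ∈ S ∧ m < x
      · simp only [if_pos h]; exact ih x _
      · simp only [if_neg h]; exact ih m _

-- the running-max-with-test loop is a fold of max over the filtered list
theorem foldlA_eq_foldl_max (S : PySem.Set Int) :
    ∀ (L : List Int) (m : Int),
      L.foldl (fun m i => if -i ∈ S ∧ m < i then i else m) m
      = (L.filter (fun i => decide (-i ∈ S))).foldl max m := by
  intro L
  induction L with
  | nil => intro m; rfl
  | cons x xs ih =>
      intro m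
      simp only [List.foldl_cons, List.filter_cons]
      by_cases hp : -x ∈ S
      · simp only [hp, decide_true, if_true, true_and, List.foldl_cons]
        by_cases hlt : m < x
        · rw [if_pos hlt, ih]; congr 1; omega
        · rw [if_neg hlt, ih]; congr 1; omega
      · have hc : ¬ (-x ∈ S ∧ m < x) := fun h => hp h.1
        simp only [if_neg hc, hp, decide_false, Bool.false_eq_true, if_false]
        exact ih m

-- B's scan returns the head of the filtered list, or -1
theorem solveFind_eq (s : PySem.Set Int) :
    ∀ (L : List Int),
      solveFind s L = ((L.filter (fun x => decide (-x ∈ s))).headD (-1)) := by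
  intro L
  induction L with
  | nil => rfl
  | cons x xs ih =>
      simp only [solveFind, List.filter_cons, PySem.Set.contains_eq_listContains,
        List.contains_iff_mem]
      by_cases hp : -x ∈ s
      · simp [hp]
      · simp [hp, ih]

theorem foldl_max_of_forall_le (a : Int) :
    ∀ (L : List Int), (∀ y ∈ L, y ≤ a) → L.foldl max a = a := by
  intro L
  induction L with
  | nil => intro _; rfl
  | cons x xs ih =>
      intro h
      have hx : x ≤ a := h x (by simp)
      simp only [List.foldl_cons, max_eq_left hx]
      exact ih (fun y hy => h y (by simp [hy]))

theorem solve_spec_aux (nums : List Int) : solve nums = solve_alt nums := by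
  unfold solve solve_alt
  set S : PySem.Set Int := PySem.Set.ofList nums with hS
  have hport :
      (S.foldl (fun (st : Int × PySem.Dict Int Int) i =>
          let dict1 := st.2.insert i (-i)
          if PySem.Set.contains S (dict1.getD i 0) && decide (i > st.1) then (i, dict1)
          else (st.1, dict1)) ((-1 : Int), PySem.Dict.empty)).1
      = (S.foldl (fun (st : Int × PySem.Dict Int Int) i =>
          if -i ∈ S ∧ st.1 < i then (i, st.2.insert i (-i)) else (st.1, st.2.insert i (-i)))
          ((-1 : Int), PySem.Dict.empty)).1 := by
    congr 1
    apply PySem.List.foldl_congr_mem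
    intro st i _
    simp only [PySem.Dict.getD_insert_self, PySem.Set.contains_eq_listContains,
      List.contains_iff_mem, Bool.and_eq_true, decide_eq_true_eq, gt_iff_lt]
  rw [hport, solve_fst_eq, foldlA_eq_foldl_max, solveFind_eq]
  have hperm : (PySem.List.sorted S (fun x => x) true).Perm S :=
    PySem.List.sorted_perm S (fun x => x) true
  set P : Int → Bool := fun i => decide (-i ∈ S) with hP
  have hpermF : ((PySem.List.sorted S (fun x => x) true).filter P).Perm (S.filter P) :=
    hperm.filter P
  have hfold : (S.filter P).foldl max (-1 : Int)
      = ((PySem.List.sorted S (fun x => x) true).filter P).foldl max (-1 : Int) :=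
    hpermF.symm.foldl_eq (-1)
  rw [hfold]
  set F := (PySem.List.sorted S (fun x => x) true).filter P with hF
  have hpw : F.Pairwise (fun a b => b ≤ a) :=
    (PySem.List.sorted_pairwise_rev S (fun x => x)).filter P
  cases hcF : F with
  | nil => simp
  | cons x rest =>
      have hrest : ∀ y ∈ rest, y ≤ x := by
        have := hpw; rw [hcF] at this
        exact fun y hy => (List.pairwise_cons.mp this).1 y hy
      have hxF : x ∈ F := by rw [hcF]; simp
      have hxS : x ∈ S ∧ P x = true := by
        have := List.mem_filter.mp (by rw [hF] at hxF; exact hxF)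
        exact ⟨(PySem.List.mem_sorted _ _ _ _).mp this.1, this.2⟩
      have hnegx : (-x) ∈ F := by
        rw [hF]
        refine List.mem_filter.mpr ⟨?_, ?_⟩
        · exact (PySem.List.mem_sorted _ _ _ _).mpr (by simpa [hP] using hxS.2)
        · simp only [hP, neg_neg]
          simpa using hxS.1
      have hnx_le : (-x) ≤ x := by
        rw [hcF] at hnegx
        rcases List.mem_cons.mp hnegx with h | h
        · omega
        · exact hrest _ h
      simp only [List.foldl_cons]
      have h1 : max (-1 : Int) x = x := max_eq_right (by omega)
      rw [h1, foldl_max_of_forall_le x rest hrest, List.headD_cons]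

-- ===== VERDICT =====
theorem solve_spec : Claim_equal_solve := by
  intro nums _
  unfold Spec_solve
  exact solve_spec_aux nums
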